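-- pv_equiv track=rewrite | github.com/edt-yxz-zzd/python3_src | nn_ns/functional/lambda_parser.py | split_lambda_functions
-- ===== SOURCE A (Python) =====
-- def split_lambda_functions(lines):
--     # assume comment removed
--     # [str] -> [str]
--     # [line] -> [str_per_func]
--     def merge():
--         str_per_func = ''.join(ls)
--         ss.append(str_per_func)
--     ls = []
--     ss = []
--     for line in lines:
--         #line.lstrip().startswith('#')
--         if not line or line.isspace():
--             continue
--         if line[:1].isspace():
--             ls.append(line)
--             continue
--         merge()
--         ls = [line]
--     else:
--         if ls:
--             merge()
--             ls = []
--     return ss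
-- ===== SOURCE B (Python) =====
-- def split_lambda_functions(lines):
--     # Staged: keep content lines, find top-level positions, cut at them.
--     body = [ln for ln in lines if ln and not ln.isspace()]
--     if not body:
--         return []
--     cuts = [0] + [i for i, ln in enumerate(body) if not ln[:1].isspace()] + [len(body)]
--     return [''.join(body[i:j]) for i, j in zip(cuts, cuts[1:])]
-- ===== Notes on version B (the rewrite author's own statement) =====
-- stated objective: alternative
-- what changed: Replaced A's streaming accumulator that flushes the pending line list at each top-level line by three staged passes: filter the content lines, list the top-level line indices, and join the slices between consecutive cut points.
import Mathlib
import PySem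

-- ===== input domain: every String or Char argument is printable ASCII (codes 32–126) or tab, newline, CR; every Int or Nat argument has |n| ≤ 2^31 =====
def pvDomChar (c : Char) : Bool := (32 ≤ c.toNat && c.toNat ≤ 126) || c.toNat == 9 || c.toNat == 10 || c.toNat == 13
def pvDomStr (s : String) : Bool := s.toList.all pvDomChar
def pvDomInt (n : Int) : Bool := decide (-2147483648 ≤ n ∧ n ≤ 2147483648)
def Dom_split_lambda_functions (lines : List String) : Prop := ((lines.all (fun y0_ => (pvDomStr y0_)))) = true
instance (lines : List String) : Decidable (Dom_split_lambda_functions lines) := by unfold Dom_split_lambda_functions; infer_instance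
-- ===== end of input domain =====

-- B replaces A's streaming flush-on-boundary accumulator by three staged passes
-- (filter content lines, list top-level indices, join the slices between cut points);
-- objective: alternative decomposition, same cost.

-- ===== PORT A =====
-- A's loop state: (ls, ss); merge() joins ls and appends to ss; the for-else flushes a nonempty ls.
def split_lambda_functions (lines : List String) : List String :=
  let st := lines.foldl
    (fun (st : List String × List String) line =>
      if PySem.Str.len line == 0 || PySem.Str.strIsspace line then st
      else if PySem.Str.strIsspace (PySem.Str.slice line none (some 1)) then (st.1 ++ [line], st.2)
      else ([line], st.2 ++ [PySem.Str.join "" st.1]))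
    ([], [])
  if st.1.isEmpty then st.2 else st.2 ++ [PySem.Str.join "" st.1]

-- ===== PORT B =====
-- B: body = content lines; cuts = [0] + top-level indices + [len(body)]; join each slice.
def split_lambda_functions_alt (lines : List String) : List String :=
  let body := lines.filter
    (fun ln => !(PySem.Str.len ln == 0 || PySem.Str.strIsspace ln))
  if body.isEmpty then []
  else
    let cuts : List Int :=
      0 :: ((PySem.List.enumerate body 0).filter
              (fun p => !PySem.Str.strIsspace (PySem.Str.slice p.2 none (some 1)))).map (fun p => p.1)
           ++ [(body.length : Int)]
    (cuts.zip cuts.tail).map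
      (fun p => PySem.Str.join "" (PySem.List.slice body (some p.1) (some p.2)))

-- ===== PRECONDITION & SPEC =====
def Spec_split_lambda_functions (lines : List String) (out : List String) : Prop := out = split_lambda_functions_alt lines
instance (lines : List String) (out : List String) : Decidable (Spec_split_lambda_functions lines out) := by unfold Spec_split_lambda_functions; infer_instance

-- ===== CLAIM (what is proved, stated in full; the proofs are below) =====
def Claim_equal_split_lambda_functions : Prop := ∀ (lines : List String), Dom_split_lambda_functions lines → Spec_split_lambda_functions lines (split_lambda_functions lines)

-- ===== LEMMAS AND PROOFS =====

-- named predicates (definitionally the tests both ports write inline)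
def pvKeep (ln : String) : Bool := !(PySem.Str.len ln == 0 || PySem.Str.strIsspace ln)
def pvCont (ln : String) : Bool := PySem.Str.strIsspace (PySem.Str.slice ln none (some 1))

-- '' .join with empty separator concatenates: flatten ignores interspersed []s
lemma pvFlat (L : List (List Char)) : (List.intersperse ([] : List Char) L).flatten = L.flatten := by
  induction L with
  | nil => simp
  | cons a t ih =>
    cases t with
    | nil => simp
    | cons b u =>
      have h : List.intersperse ([] : List Char) (a :: b :: u) = a :: [] :: List.intersperse [] (b :: u) := rfl
      simp_all

lemma pvJoin_nil : PySem.Str.join "" ([] : List String) = "" := rfl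

lemma pvJoin_cons (x : String) (l : List String) :
    PySem.Str.join "" (x :: l) = x ++ PySem.Str.join "" l := by
  simp [PySem.Str.join, PySem.Chars.join, List.intercalate, pvFlat]

lemma pvJoin_append_singleton (ls : List String) (x : String) :
    PySem.Str.join "" (ls ++ [x]) = PySem.Str.join "" ls ++ x := by
  simp [PySem.Str.join, PySem.Chars.join, List.intercalate, pvFlat]

-- ---------- A side: the streaming pass computes grouped runs ----------

def pvStepA (st : List String × List String) (line : String) : List String × List String :=
  if PySem.Str.len line == 0 || PySem.Str.strIsspace line then st
  else if PySem.Str.strIsspace (PySem.Str.slice line none (some 1)) then (st.1 ++ [line], st.2)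
  else ([line], st.2 ++ [PySem.Str.join "" st.1])

def pvArun (l : List String) (st : List String × List String) : List String :=
  let st' := l.foldl pvStepA st
  if st'.1.isEmpty then st'.2 else st'.2 ++ [PySem.Str.join "" st'.1]

-- A's result as structural recursion on the lines, carrying the pending run ls
def pvGrp (ls : List String) : List String → List String
  | [] => if ls.isEmpty then [] else [PySem.Str.join "" ls]
  | x :: t =>
    if pvKeep x = false then pvGrp ls t
    else if pvCont x then pvGrp (ls ++ [x]) t
    else PySem.Str.join "" ls :: pvGrp [x] t

lemma pvArun_eq_grp (l : List String) : ∀ ls ss, pvArun l (ls, ss) = ss ++ pvGrp ls l := by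
  induction l with
  | nil => intro ls ss; cases ls <;> simp [pvArun, pvGrp]
  | cons x t ih =>
    intro ls ss
    by_cases hk : pvKeep x = true
    · have hkc : (PySem.Str.len x == 0 || PySem.Str.strIsspace x) = false := by
        simpa [pvKeep] using hk
      by_cases hc : pvCont x = true
      · have hc2 : PySem.Str.strIsspace (PySem.Str.slice x none (some 1)) = true := hc
        have hA : pvStepA (ls, ss) x = (ls ++ [x], ss) := by
          unfold pvStepA; rw [hkc, hc2]; simp
        have hstep : pvArun (x :: t) (ls, ss) = pvArun t (ls ++ [x], ss) := by
          simp [pvArun, List.foldl_cons, hA]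
        rw [hstep, ih, pvGrp, if_neg (by simp [hk]), if_pos hc]
      · have hc2 : PySem.Str.strIsspace (PySem.Str.slice x none (some 1)) = false := by
          revert hc; cases h : pvCont x <;> simp [pvCont] at h ⊢; exact h
        have hA : pvStepA (ls, ss) x = ([x], ss ++ [PySem.Str.join "" ls]) := by
          unfold pvStepA; rw [hkc, hc2]; simp
        have hstep : pvArun (x :: t) (ls, ss) = pvArun t ([x], ss ++ [PySem.Str.join "" ls]) := by
          simp [pvArun, List.foldl_cons, hA]
        rw [hstep, ih, pvGrp, if_neg (by simp [hk]), if_neg (by simp [hc])]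
        simp
    · have hk' : pvKeep x = false := by revert hk; cases pvKeep x <;> simp
      have hkc : (PySem.Str.len x == 0 || PySem.Str.strIsspace x) = true :=
        by unfold pvKeep at hk'; revert hk'; cases (PySem.Str.len x == 0 || PySem.Str.strIsspace x) <;> simp
      have hA : pvStepA (ls, ss) x = (ls, ss) := by
        unfold pvStepA; rw [hkc]; simp
      have hstep : pvArun (x :: t) (ls, ss) = pvArun t (ls, ss) := by
        simp [pvArun, List.foldl_cons, hA]
      rw [hstep, ih, pvGrp, if_pos hk']

lemma pvGrp_filter (l : List String) : ∀ ls, pvGrp ls (l.filter pvKeep) = pvGrp ls l := by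
  induction l with
  | nil => intro ls; rfl
  | cons x t ih =>
    intro ls
    by_cases hk : pvKeep x = true
    · rw [List.filter_cons_of_pos hk]
      by_cases hc : pvCont x = true <;> simp [pvGrp, hk, hc, ih]
    · have hk' : pvKeep x = false := by revert hk; cases pvKeep x <;> simp
      rw [List.filter_cons_of_neg (by simp [hk'])]
      simp [pvGrp, hk', ih]

-- ---------- B side: cut points and slices ----------

-- the top-level indices of a (content-only) list, as naturals
def pvIdxs : List String → List Nat
  | [] => []
  | x :: t => (if pvCont x then [] else [0]) ++ (pvIdxs t).map (· + 1)

def pvCutsN (body : List String) : List Nat := 0 :: pvIdxs body ++ [body.length]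

def pvSJ (body : List String) (p : Nat × Nat) : String :=
  PySem.Str.join "" ((body.drop p.1).take (p.2 - p.1))

def pvGN (body : List String) : List String :=
  ((pvCutsN body).zip (pvCutsN body).tail).map (pvSJ body)

lemma pvIdxs_enum (t : List String) : ∀ s : Int,
    ((PySem.List.enumerate t s).filter (fun p => !pvCont p.2)).map (fun p => p.1)
      = (pvIdxs t).map (fun k : Nat => s + (k : Int)) := by
  induction t with
  | nil => intro s; simp [PySem.List.enumerate_nil, pvIdxs]
  | cons x t ih =>
    intro s
    rw [PySem.List.enumerate_cons]
    by_cases hc : pvCont x = true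
    · rw [List.filter_cons_of_neg (by simp [hc])]
      rw [ih, pvIdxs, if_pos hc]
      simp [List.map_map, Function.comp]
      intro k _; ring
    · have hc' : pvCont x = false := by revert hc; cases pvCont x <;> simp
      rw [List.filter_cons_of_pos (by simp [hc'])]
      rw [List.map_cons, ih, pvIdxs, if_neg (by simp [hc'])]
      simp [List.map_map, Function.comp]
      intro k _; ring

lemma pvAlt_eq (lines : List String) :
    split_lambda_functions_alt lines =
      (if (lines.filter pvKeep).isEmpty then [] else pvGN (lines.filter pvKeep)) := by
  simp only [split_lambda_functions_alt]
  simp only [show (fun ln => !(PySem.Str.len ln == 0 || PySem.Str.strIsspace ln)) = pvKeep from rfl]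
  set body := lines.filter pvKeep with hb
  by_cases h : body.isEmpty
  · simp [h]
  · have hf : body.isEmpty = false := Bool.not_eq_true _ |>.mp h
    simp only [hf, Bool.false_eq_true, if_false]
    have hcuts :
        ((0 : Int) :: ((PySem.List.enumerate body 0).filter
              (fun p => !PySem.Str.strIsspace (PySem.Str.slice p.2 none (some 1)))).map (fun p => p.1)
           ++ [(body.length : Int)])
          = (pvCutsN body).map (fun k : Nat => (k : Int)) := by
      have he := pvIdxs_enum body 0
      simp only [zero_add] at he
      have hfe : (fun p : Int × String => !PySem.Str.strIsspace (PySem.Str.slice p.2 none (some 1)))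
          = (fun p : Int × String => !pvCont p.2) := rfl
      rw [hfe, he]
      simp [pvCutsN]
    rw [hcuts]
    have htail : ((pvCutsN body).map (fun k : Nat => (k : Int))).tail
        = ((pvCutsN body).tail).map (fun k : Nat => (k : Int)) := by
      cases pvCutsN body <;> simp
    rw [htail, List.zip_map, List.map_map]
    refine List.map_congr_left ?_
    rintro ⟨i, j⟩ _
    simp [Function.comp, pvSJ, PySem.List.slice_natCast]

-- pvGN's three recurrences
lemma pvGN_nil : pvGN [] = [""] := rfl

lemma pvSJ_shift (x : String) (t : List String) :
    (pvSJ (x :: t)) ∘ (Prod.map (· + 1) (· + 1)) = pvSJ t := by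
  funext p; rcases p with ⟨i, j⟩
  simp [pvSJ, Function.comp, Nat.add_sub_add_right]

lemma pvCutsN_decomp (body : List String) :
    ∃ c rest, pvIdxs body ++ [body.length] = c :: rest := by
  cases h : pvIdxs body with
  | nil => exact ⟨body.length, [], by simp⟩
  | cons a l => exact ⟨a, l ++ [body.length], by simp⟩

lemma pvGN_cons_cont (x : String) (t : List String) (hc : pvCont x = true) :
    pvGN (x :: t) = (x ++ (pvGN t).headD "") :: (pvGN t).tail := by
  obtain ⟨c, rest, hu⟩ := pvCutsN_decomp t
  have hcut : pvCutsN (x :: t) = 0 :: (c :: rest).map (· + 1) := by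
    simp [pvCutsN, pvIdxs, hc, ← hu]
  have hcutt : pvCutsN t = 0 :: c :: rest := by simp [pvCutsN, hu]
  unfold pvGN
  rw [hcut, hcutt]
  simp only [List.tail_cons, List.map_cons]
  rw [List.zip_cons_cons, List.zip_cons_cons, List.map_cons, List.map_cons]
  have hzip : (((c :: rest).map (· + 1)).zip ((rest).map (· + 1)))
      = ((c :: rest).zip rest).map (Prod.map (· + 1) (· + 1)) := List.zip_map
  have h2 : (((c + 1) :: rest.map (· + 1)).zip (rest.map (· + 1)))
      = ((c :: rest).zip rest).map (Prod.map (· + 1) (· + 1)) := by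
    simpa using hzip
  rw [h2, List.map_map, pvSJ_shift]
  congr 1
  simp [pvSJ, List.take_succ_cons, pvJoin_cons]

lemma pvGN_cons_top (x : String) (t : List String) (hc : pvCont x = false) :
    pvGN (x :: t) = "" :: (x ++ (pvGN t).headD "") :: (pvGN t).tail := by
  obtain ⟨c, rest, hu⟩ := pvCutsN_decomp t
  have hcut : pvCutsN (x :: t) = 0 :: 0 :: (c :: rest).map (· + 1) := by
    simp [pvCutsN, pvIdxs, hc, ← hu]
  have hcutt : pvCutsN t = 0 :: c :: rest := by simp [pvCutsN, hu]
  unfold pvGN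
  rw [hcut, hcutt]
  simp only [List.tail_cons, List.map_cons]
  rw [List.zip_cons_cons, List.zip_cons_cons, List.zip_cons_cons, List.map_cons, List.map_cons, List.map_cons]
  have hzip : (((c :: rest).map (· + 1)).zip ((rest).map (· + 1)))
      = ((c :: rest).zip rest).map (Prod.map (· + 1) (· + 1)) := List.zip_map
  have h2 : (((c + 1) :: rest.map (· + 1)).zip (rest.map (· + 1)))
      = ((c :: rest).zip rest).map (Prod.map (· + 1) (· + 1)) := by
    simpa using hzip
  rw [h2, List.map_map, pvSJ_shift]
  simp [pvSJ, List.take_succ_cons, pvJoin_cons, pvJoin_nil]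

-- bridge: on a content-only list, the streamed groups are the sliced groups
lemma pvGrp_eq_GN (body : List String) (hall : ∀ x ∈ body, pvKeep x = true) :
    ∀ ls : List String,
      pvGrp ls body =
        if ls.isEmpty ∧ body.isEmpty then []
        else (PySem.Str.join "" ls ++ (pvGN body).headD "") :: (pvGN body).tail := by
  induction body with
  | nil =>
    intro ls
    cases ls with
    | nil => simp [pvGrp]
    | cons a l => simp [pvGrp, pvGN_nil]
  | cons x t ih =>
    intro ls
    have hk : pvKeep x = true := hall x (by simp)
    have hallt : ∀ y ∈ t, pvKeep y = true := fun y hy => hall y (by simp [hy])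
    rw [pvGrp, if_neg (by simp [hk])]
    by_cases hc : pvCont x = true
    · rw [if_pos hc, ih hallt (ls ++ [x]), pvGN_cons_cont x t hc]
      simp [pvJoin_append_singleton, String.append_assoc]
    · have hc' : pvCont x = false := by revert hc; cases pvCont x <;> simp
      rw [if_neg (by simp [hc']), ih hallt [x], pvGN_cons_top x t hc']
      simp [pvJoin_cons, pvJoin_nil]

-- ===== VERDICT (by name: the statement is the Claim_ definition above) =====
theorem split_lambda_functions_spec : Claim_equal_split_lambda_functions := by
  intro lines _
  show split_lambda_functions lines = split_lambda_functions_alt lines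
  have hA : split_lambda_functions lines = pvArun lines ([], []) := rfl
  rw [hA, pvArun_eq_grp lines [] [], List.nil_append, ← pvGrp_filter, pvAlt_eq]
  set body := lines.filter pvKeep with hb
  have hall : ∀ x ∈ body, pvKeep x = true := fun x hx => (List.mem_filter.mp hx).2
  rw [pvGrp_eq_GN body hall []]
  by_cases h : body.isEmpty
  · simp [h]
  · simp only [h, List.isEmpty_iff] at *
    rw [if_neg (by simp)]
    obtain ⟨c, rest, hu⟩ := pvCutsN_decomp body
    have : pvGN body = pvSJ body (0, c) :: ((c :: rest).zip rest).map (pvSJ body) := by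
      unfold pvGN
      rw [show pvCutsN body = 0 :: c :: rest by simp [pvCutsN, hu]]
      simp [List.zip_cons_cons]
    rw [this]
    simp [pvJoin_nil]
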